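-- pv_equiv track=rewrite | github.com/ferna068/ads-ais-system | src/infrastructure/adapters.py | sixbit_encode
-- ===== SOURCE A (Python) =====
-- from typing import Dict, Optional, Callable, Awaitable, Set, Tuple
--
-- def sixbit_encode(bitstring: str) -> Tuple[str, int]:
--     table = [chr(i + 48) if i < 40 else chr(i + 56) for i in range(64)]
--     pad = (6 - (len(bitstring) % 6)) % 6
--     bitstring_padded = bitstring + '0' * pad
--     payload = ''
--     for i in range(0, len(bitstring_padded), 6):
--         sextet = bitstring_padded[i:i+6]
--         payload += table[int(sextet, 2)]
--     return payload, pad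
-- ===== SOURCE B (Python) =====
-- def sixbit_encode(bitstring):
--     pad = (6 - len(bitstring) % 6) % 6
--     if not bitstring:
--         return '', pad
--     v = int(bitstring, 2) << pad
--     g = (len(bitstring) + pad) // 6
--     payload = ''.join(
--         chr(c + 48) if c < 40 else chr(c + 56)
--         for c in (((v >> (6 * (g - 1 - i))) & 63) for i in range(g))
--     )
--     return payload, pad
-- ===== Notes on version B (the rewrite author's own statement) =====
-- stated objective: alternative
-- what changed: B drops A's 64-entry table, zero-padded string copy and per-sextet slicing with int(sextet,2): it parses the whole bitstring ONCE with int(bitstring,2), shifts the pad bits in, and peels each 6-bit payload value off the big integer with shifts and masks; …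
-- outside the precondition, e.g. on sixbit_encode(' '): A returns ('0', 5), B raises ValueError; on sixbit_encode('0b'): A returns ('0', 4), B raises ValueError; on sixbit_encode('101010 '): A returns ('b0', 5), B returns ('E0', 5)
import Mathlib
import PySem

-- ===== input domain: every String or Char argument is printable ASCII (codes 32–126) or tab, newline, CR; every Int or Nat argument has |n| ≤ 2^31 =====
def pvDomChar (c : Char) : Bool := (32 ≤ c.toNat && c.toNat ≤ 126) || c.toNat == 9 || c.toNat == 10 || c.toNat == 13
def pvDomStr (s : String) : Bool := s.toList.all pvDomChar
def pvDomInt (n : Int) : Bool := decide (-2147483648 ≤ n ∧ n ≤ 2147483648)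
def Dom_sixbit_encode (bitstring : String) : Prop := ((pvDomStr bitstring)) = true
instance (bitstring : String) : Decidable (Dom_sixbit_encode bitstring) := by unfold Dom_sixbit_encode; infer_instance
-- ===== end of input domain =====

-- B parses the whole bitstring once with int(bitstring, 2) and peels each 6-bit payload value
-- off the big integer with shifts and masks, instead of A's 64-entry table, zero-padded string
-- copy and per-sextet slicing (objective: alternative).

-- ===== PORT A =====
-- hand port of Python's int(x, 2) (used by A on each sextet and by B on the whole string):
-- optional surrounding whitespace, optional sign, optional 0b/0B prefix, '0'/'1' digits with
-- single underscores between digits.  Exact on the ASCII domain; where Python raises ValueError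
-- this parser returns none (such inputs are excluded by Pre_).
def pvIsWs (c : Char) : Bool := c = ' ' || c = '\t' || c = '\n' || c = '\r' || c = Char.ofNat 11 || c = Char.ofNat 12
def pvBitB (c : Char) : Bool := c = '0' || c = '1'
def pvBitVal (c : Char) : Int := if c = '1' then 1 else 0

def pvGo (v : Int) : List Char → Option Int
  | [] => some v
  | '_' :: c :: r => if pvBitB c then pvGo (v * 2 + pvBitVal c) r else none
  | c :: r => if pvBitB c then pvGo (v * 2 + pvBitVal c) r else
      if (c :: r).all pvIsWs then some v else none

def pvDigits : List Char → Option Int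
  | c :: r => if pvBitB c then pvGo (pvBitVal c) r else none
  | [] => none

def pvDigitsPre : List Char → Option Int
  | '_' :: r => pvDigits r
  | r => pvDigits r

def pvCore : List Char → Option Int
  | '0' :: 'b' :: r => pvDigitsPre r
  | '0' :: 'B' :: r => pvDigitsPre r
  | l => pvDigits l

def pvSign : List Char → Option Int
  | '+' :: r => pvCore r
  | '-' :: r => (pvCore r).map (fun v => -v)
  | r => pvCore r

def pvParse2 (l : List Char) : Option Int := pvSign (l.dropWhile pvIsWs)

def sixbit_encode (bitstring : String) : String × Int :=
  let table : List Char := (PySem.List.pyRange 0 64 1).map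
    (fun i => if i < 40 then Char.ofNat (i + 48).toNat else Char.ofNat (i + 56).toNat)
  let pad : Int := PySem.Int.mod (6 - PySem.Int.mod (bitstring.toList.length : Int) 6) 6
  let padded : List Char := bitstring.toList ++ List.replicate pad.toNat '0'
  -- int(sextet, 2) is pvParse2 (none = ValueError, excluded by Pre_; .getD 0 is a placeholder
  -- there); under Pre_ a sextet's value lies in [0, 64), so the table lookup never raises
  -- IndexError and the default ' ' of pyGetD is never used.
  let payload : List Char := (PySem.List.pyRange 0 (padded.length : Int) 6).foldl
    (fun pay i =>
      pay ++ [PySem.List.pyGetD table ((pvParse2 (PySem.List.slice padded (some i) (some (i + 6)))).getD 0) ' ']) []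
  (String.ofList payload, pad)

-- ===== PORT B =====
-- chr(c + 48) if c < 40 else chr(c + 56)
def pvEmit (v : Int) : Char :=
  if v < 40 then Char.ofNat (v + 48).toNat else Char.ofNat (v + 56).toNat

def sixbit_encode_alt (bitstring : String) : String × Int :=
  let pad : Int := PySem.Int.mod (6 - PySem.Int.mod (bitstring.toList.length : Int) 6) 6
  if bitstring.toList = [] then ("", pad)
  else
    -- int(bitstring, 2) is pvParse2 (none = ValueError, excluded by Pre_; .getD 0 is a
    -- placeholder there); v << pad is v * 2^pad, exact for every int
    let v : Int := (pvParse2 bitstring.toList).getD 0 * 2 ^ pad.toNat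
    let g : Int := PySem.Int.floordiv ((bitstring.toList.length : Int) + pad) 6
    -- v >> k is v // 2^k and v & 63 is v mod 64 — exact for every int; the shift count
    -- 6*(g-1-i) is ≥ 0 for every i of range(g), so .toNat is exact
    let chars : List Char := (PySem.List.pyRange 0 g 1).map
      (fun i => pvEmit (PySem.Int.mod (PySem.Int.floordiv v (2 ^ (6 * (g - 1 - i)).toNat)) 64))
    (String.ofList chars, pad)

-- ===== PRECONDITION & SPEC =====
-- Pre_ admits optionally whitespace-wrapped bitstrings (trailing whitespace only when the string
-- is a single sextet).  It excludes inputs where A raises ValueError; digit-free strings, where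
-- A's per-sextet parse reads the appended pad zeros as digits while B's single int() raises
-- ValueError; and strings with signs, 0b prefixes, underscores or multi-sextet trailing
-- whitespace, where A's positional 6-character windowing and B's whole-string parse can disagree.
def Pre_sixbit_encode (bitstring : String) : Prop :=
  (decide ((bitstring.toList.dropWhile pvIsWs).takeWhile pvBitB ≠ [])
    && ((bitstring.toList.dropWhile pvIsWs).dropWhile pvBitB).all pvIsWs
    && decide ((bitstring.toList.takeWhile pvIsWs).length ≤ 5)
    && (decide ((bitstring.toList.dropWhile pvIsWs).dropWhile pvBitB = [])
        || decide (bitstring.toList.length = 6))) = true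
instance (bitstring : String) : Decidable (Pre_sixbit_encode bitstring) := by
  unfold Pre_sixbit_encode; infer_instance

def pvWitness_sixbit_encode : String := "101"

def Spec_sixbit_encode (bitstring : String) (out : String × Int) : Prop := out = sixbit_encode_alt bitstring
instance (bitstring : String) (out : String × Int) : Decidable (Spec_sixbit_encode bitstring out) := by unfold Spec_sixbit_encode; infer_instance

-- ===== CLAIM (what is proved, stated in full; the proofs are below) =====
def Claim_equal_sixbit_encode : Prop := ∀ (bitstring : String), Dom_sixbit_encode bitstring → Pre_sixbit_encode bitstring → Spec_sixbit_encode bitstring (sixbit_encode bitstring)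

-- ===== LEMMAS AND PROOFS =====

-- the binary value of a bit list, accumulated from v
def pvBfold (v : Int) (l : List Char) : Int := l.foldl (fun a c => a * 2 + pvBitVal c) v

theorem pvMod6 (n : Int) : PySem.Int.mod n 6 = n % 6 := by
  simp [PySem.Int.mod, Int.fmod_eq_emod]

theorem pvMod64 (n : Int) : PySem.Int.mod n 64 = n % 64 := by
  simp [PySem.Int.mod, Int.fmod_eq_emod]

theorem pvFdiv (a b : Int) (hb : 0 ≤ b) : PySem.Int.floordiv a b = a / b := by
  simp [PySem.Int.floordiv, Int.fdiv_eq_ediv, hb]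

theorem pvBfold_nil (v : Int) : pvBfold v [] = v := rfl
theorem pvBfold_cons (v : Int) (c : Char) (r : List Char) :
    pvBfold v (c :: r) = pvBfold (v * 2 + pvBitVal c) r := rfl

theorem pvBfold_shift (l : List Char) : ∀ v : Int, pvBfold v l = v * 2 ^ l.length + pvBfold 0 l := by
  induction l with
  | nil => intro v; simp [pvBfold_nil]
  | cons c r ih =>
    intro v
    rw [pvBfold_cons, ih, pvBfold_cons, ih (0 * 2 + pvBitVal c)]
    simp only [List.length_cons]
    ring

theorem pvBfold_append (X Y : List Char) :
    pvBfold 0 (X ++ Y) = pvBfold 0 X * 2 ^ Y.length + pvBfold 0 Y := by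
  unfold pvBfold
  rw [List.foldl_append, ← pvBfold, ← pvBfold, ← pvBfold, pvBfold_shift]

theorem pvBfold_zeros (p : Nat) : pvBfold 0 (List.replicate p '0') = 0 := by
  induction p with
  | zero => simp [pvBfold]
  | succ p ih =>
    rw [List.replicate_succ, pvBfold_cons]
    simpa [pvBitVal] using ih

theorem pvBfold_append_zeros (l : List Char) (p : Nat) :
    pvBfold 0 (l ++ List.replicate p '0') = pvBfold 0 l * 2 ^ p := by
  rw [pvBfold_append, pvBfold_zeros, List.length_replicate]
  ring

theorem pvBfold_zeros_prefix (a : Nat) (l : List Char) :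
    pvBfold 0 (List.replicate a '0' ++ l) = pvBfold 0 l := by
  rw [pvBfold_append, pvBfold_zeros]
  ring

theorem pvBfoldBound (l : List Char) : ∀ v : Int, 0 ≤ v →
    0 ≤ pvBfold v l ∧ pvBfold v l < (v + 1) * 2 ^ l.length := by
  induction l with
  | nil => intro v hv; rw [pvBfold_nil]; exact ⟨hv, by simp⟩
  | cons c r ih =>
    intro v hv
    have hb : (0:Int) ≤ pvBitVal c ∧ pvBitVal c ≤ 1 := by
      unfold pvBitVal; split <;> norm_num
    rw [pvBfold_cons]
    obtain ⟨h0, h1⟩ := ih (v * 2 + pvBitVal c) (by omega)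
    refine ⟨h0, lt_of_lt_of_le h1 ?_⟩
    have hp : (0:Int) < 2 ^ r.length := by positivity
    calc (v * 2 + pvBitVal c + 1) * 2 ^ r.length
        ≤ ((v + 1) * 2) * 2 ^ r.length := by nlinarith
      _ = (v + 1) * 2 ^ (r.length + 1) := by ring
      _ = (v + 1) * 2 ^ ((c :: r).length) := by simp

-- the 6-bit group k of a bit list of length 6*G, extracted arithmetically
theorem pvChunkVal (S : List Char) (G k : Nat) (hlen : S.length = 6 * G) (hk : k < G) :
    pvBfold 0 S / 2 ^ (6 * (G - 1 - k)) % 64 = pvBfold 0 ((S.drop (6 * k)).take 6) := by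
  have hS1 : S = S.take (6 * k) ++ ((S.drop (6 * k)).take 6 ++ (S.drop (6 * k)).drop 6) := by
    rw [List.take_append_drop, List.take_append_drop]
  set T1 := S.take (6 * k) with hT1
  set C := (S.drop (6 * k)).take 6 with hC
  set T2 := (S.drop (6 * k)).drop 6 with hT2
  have hlC : C.length = 6 := by
    simp only [hC, List.length_take, List.length_drop, hlen]; omega
  have hlT2 : T2.length = 6 * (G - 1 - k) := by
    simp only [hT2, List.length_drop, hlen]; omega
  have hV : pvBfold 0 S
      = (pvBfold 0 T1 * 64 + pvBfold 0 C) * 2 ^ (6 * (G - 1 - k)) + pvBfold 0 T2 := by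
    conv_lhs => rw [hS1]
    rw [pvBfold_append, pvBfold_append, List.length_append, hlC, hlT2]
    ring
  obtain ⟨hr0, hr1⟩ := pvBfoldBound T2 0 le_rfl
  obtain ⟨hc0, hc1⟩ := pvBfoldBound C 0 le_rfl
  have hr1' : pvBfold 0 T2 < 2 ^ (6 * (G - 1 - k)) := by simpa [hlT2] using hr1
  have hc64 : pvBfold 0 C < 64 := by
    have h := hc1
    rw [hlC] at h
    norm_num at h
    exact h
  have hPpos : (0:Int) < 2 ^ (6 * (G - 1 - k)) := by positivity
  rw [hV, show (pvBfold 0 T1 * 64 + pvBfold 0 C) * 2 ^ (6 * (G - 1 - k)) + pvBfold 0 T2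
      = pvBfold 0 T2 + (pvBfold 0 T1 * 64 + pvBfold 0 C) * 2 ^ (6 * (G - 1 - k)) from by ring]
  rw [Int.add_mul_ediv_right _ _ (ne_of_gt hPpos)]
  rw [Int.ediv_eq_zero_of_lt hr0 hr1']
  omega

-- unfolding equations for the parser helpers
theorem pvGo_nil (v : Int) : pvGo v [] = some v := rfl
theorem pvGo_cons_ne (v : Int) (c : Char) (r : List Char) (h : ¬ c = '_') :
    pvGo v (c :: r) = if pvBitB c then pvGo (v * 2 + pvBitVal c) r else
      if (c :: r).all pvIsWs then some v else none := by
  rw [pvGo.eq_def]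
  split
  · rename_i heq; cases heq
  · rename_i heq; rw [List.cons.injEq] at heq; exact absurd heq.1 h
  · rename_i c' r' heq; cases heq; rfl

theorem pvDigits_cons (c : Char) (r : List Char) :
    pvDigits (c :: r) = if pvBitB c then pvGo (pvBitVal c) r else none := rfl

theorem pvCore_single (c : Char) : pvCore [c] = pvDigits [c] := by
  rw [pvCore.eq_def]
  split
  · rename_i heq; simp at heq
  · rename_i heq; simp at heq
  · rfl
theorem pvCore_two_ne (c1 c2 : Char) (r : List Char)
    (h : ¬ (c1 = '0' ∧ (c2 = 'b' ∨ c2 = 'B'))) :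
    pvCore (c1 :: c2 :: r) = pvDigits (c1 :: c2 :: r) := by
  rw [pvCore.eq_def]
  split
  · rename_i heq
    rw [List.cons.injEq, List.cons.injEq] at heq
    exact absurd ⟨heq.1, Or.inl heq.2.1⟩ h
  · rename_i heq
    rw [List.cons.injEq, List.cons.injEq] at heq
    exact absurd ⟨heq.1, Or.inr heq.2.1⟩ h
  · rfl

theorem pvSign_cons_ne (c : Char) (r : List Char) (h1 : ¬ c = '+') (h2 : ¬ c = '-') :
    pvSign (c :: r) = pvCore (c :: r) := by
  rw [pvSign.eq_def]
  split
  · rename_i heq; rw [List.cons.injEq] at heq; exact absurd heq.1 h1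
  · rename_i heq; rw [List.cons.injEq] at heq; exact absurd heq.1 h2
  · rfl

theorem pvBit_cases (c : Char) (h : pvBitB c = true) : c = '0' ∨ c = '1' := by
  unfold pvBitB at h
  rcases Bool.or_eq_true _ _ |>.mp h with h | h
  · left; exact of_decide_eq_true h
  · right; exact of_decide_eq_true h

theorem pvWs_cases (c : Char) (h : pvIsWs c = true) :
    c = ' ' ∨ c = '\t' ∨ c = '\n' ∨ c = '\r' ∨ c = Char.ofNat 11 ∨ c = Char.ofNat 12 := by
  unfold pvIsWs at h
  simp only [Bool.or_eq_true, decide_eq_true_eq] at h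
  tauto

theorem pvWs_ne_us (c : Char) (h : pvIsWs c = true) : ¬ c = '_' := by
  rcases pvWs_cases c h with h | h | h | h | h | h <;> (subst h; decide)

theorem pvWs_not_bit (c : Char) (h : pvIsWs c = true) : pvBitB c = false := by
  rcases pvWs_cases c h with h | h | h | h | h | h <;> (subst h; decide)

theorem pvBit_not_ws (c : Char) (h : pvBitB c = true) : pvIsWs c = false := by
  rcases pvBit_cases c h with h | h <;> (subst h; decide)

theorem pvBW_ne_bB (c : Char) (h : pvBitB c = true ∨ pvIsWs c = true) :
    ¬ (c = 'b' ∨ c = 'B') := by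
  rcases h with h | h
  · rcases pvBit_cases c h with h | h <;> (subst h; decide)
  · rcases pvWs_cases c h with h | h | h | h | h | h <;> (subst h; decide)

theorem pvAllTakeWhile (p : Char → Bool) (l : List Char) : (l.takeWhile p).all p = true := by
  rw [List.all_eq_true]
  exact fun c hc => List.mem_takeWhile_imp hc

theorem pvDropWhileWs_append (w : List Char) : ∀ x : List Char, w.all pvIsWs = true →
    (w ++ x).dropWhile pvIsWs = x.dropWhile pvIsWs := by
  induction w with
  | nil => intro x _; rfl
  | cons c r ih =>
    intro x hall
    simp only [List.all_cons, Bool.and_eq_true] at hall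
    rw [List.cons_append, List.dropWhile_cons_of_pos hall.1]
    exact ih x hall.2

-- pvGo over digits followed by trailing whitespace
theorem pvGo_bits_ws (d : List Char) : ∀ (t : List Char) (v : Int),
    d.all pvBitB = true → t.all pvIsWs = true →
    pvGo v (d ++ t) = some (pvBfold v d) := by
  induction d with
  | nil =>
    intro t v _ ht
    rw [List.nil_append, pvBfold_nil]
    cases t with
    | nil => exact pvGo_nil v
    | cons c r =>
      have hc : pvIsWs c = true := by
        simp only [List.all_cons, Bool.and_eq_true] at ht; exact ht.1
      rw [pvGo_cons_ne _ _ _ (pvWs_ne_us c hc)]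
      simp [pvWs_not_bit c hc, ht]
  | cons c r ih =>
    intro t v hall ht
    simp only [List.all_cons, Bool.and_eq_true] at hall
    have hcu : ¬ c = '_' := by
      rcases pvBit_cases c hall.1 with h | h <;> (subst h; decide)
    rw [List.cons_append, pvGo_cons_ne _ _ _ hcu, if_pos hall.1, pvBfold_cons]
    exact ih t _ hall.2 ht

-- int(w ++ d ++ t, 2) for whitespace w, t and nonempty digits d is the binary value of d
theorem pvParse2_wdt (w d t : List Char) (hw : w.all pvIsWs = true) (hd : d.all pvBitB = true)
    (ht : t.all pvIsWs = true) (hne : d ≠ []) :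
    pvParse2 (w ++ (d ++ t)) = some (pvBfold 0 d) := by
  unfold pvParse2
  rw [pvDropWhileWs_append w (d ++ t) hw]
  cases d with
  | nil => exact absurd rfl hne
  | cons c r =>
    simp only [List.all_cons, Bool.and_eq_true] at hd
    rw [List.cons_append, List.dropWhile_cons_of_neg (by simp [pvBit_not_ws c hd.1])]
    have hplus : ¬ c = '+' := by rcases pvBit_cases c hd.1 with h | h <;> (subst h; decide)
    have hminus : ¬ c = '-' := by rcases pvBit_cases c hd.1 with h | h <;> (subst h; decide)
    rw [pvSign_cons_ne _ _ hplus hminus]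
    have hcore : pvCore (c :: (r ++ t)) = pvDigits (c :: (r ++ t)) := by
      cases hrt : r ++ t with
      | nil => exact pvCore_single c
      | cons c2 r2 =>
        apply pvCore_two_ne
        rintro ⟨-, h2⟩
        have hc2 : pvBitB c2 = true ∨ pvIsWs c2 = true := by
          cases r with
          | nil =>
            rw [List.nil_append] at hrt
            right
            rw [List.all_eq_true] at ht
            exact ht c2 (by rw [hrt]; simp)
          | cons c3 r3 =>
            left
            rw [List.cons_append, List.cons.injEq] at hrt
            rw [List.all_eq_true] at hd
            exact hrt.1 ▸ hd.2 c3 (by simp)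
        exact pvBW_ne_bB c2 hc2 h2
    rw [hcore, pvDigits_cons, if_pos hd.1, pvGo_bits_ws r t _ hd.2 ht, pvBfold_cons]
    norm_num

theorem pvParse2_bits (l : List Char) (hall : l.all pvBitB = true) (hne : l ≠ []) :
    pvParse2 l = some (pvBfold 0 l) := by
  have := pvParse2_wdt [] l [] (by simp) hall (by simp) hne
  simpa using this

-- A's table lookup at a value in [0, 64) is the arithmetic character
theorem pvTblEmit (w : Int) (h0 : 0 ≤ w) (h1 : w < 64) :
    PySem.List.pyGetD ((PySem.List.pyRange 0 64 1).map
      (fun i => if i < 40 then Char.ofNat (i + 48).toNat else Char.ofNat (i + 56).toNat)) w ' '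
    = pvEmit w := by
  have hlen : ((PySem.List.pyRange 0 64 1).map
      (fun i => if i < 40 then Char.ofNat (i + 48).toNat else Char.ofNat (i + 56).toNat)).length = 64 := by
    simp [PySem.List.length_pyRange_one]
  rw [PySem.List.pyGetD_eq_getElem _ ' ' h0 (by rw [hlen]; exact_mod_cast h1)]
  rw [List.getElem_map, PySem.List.getElem_pyRange_one]
  simp [pvEmit, Int.toNat_of_nonneg h0]

-- A's payload fold over a padded string of length 6*G whose window k parses to the value of
-- window k of the bit list S
theorem pvAmap (padded S : List Char) (G : Nat)
    (hplen : padded.length = 6 * G)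
    (hwin : ∀ k : Nat, k < G →
      pvParse2 ((padded.drop (6 * k)).take 6) = some (pvBfold 0 ((S.drop (6 * k)).take 6))) :
    (PySem.List.pyRange 0 (padded.length : Int) 6).foldl
      (fun pay i =>
        pay ++ [PySem.List.pyGetD ((PySem.List.pyRange 0 64 1).map
          (fun i => if i < 40 then Char.ofNat (i + 48).toNat else Char.ofNat (i + 56).toNat))
          ((pvParse2 (PySem.List.slice padded (some i) (some (i + 6)))).getD 0) ' ']) []
    = (List.range G).map (fun k => pvEmit (pvBfold 0 ((S.drop (6 * k)).take 6))) := by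
  rw [PySem.List.foldl_append_singleton_eq_map, List.nil_append]
  rw [PySem.List.pyRange_of_pos 0 _ (by norm_num : (0:Int) < 6), List.map_map]
  have hcnt : (if (0:Int) < (padded.length : Int) then
      (((padded.length : Int) - 0 + 6 - 1) / 6).toNat else 0) = G := by
    rw [hplen]
    split_ifs with h
    · omega
    · omega
  rw [hcnt]
  apply List.map_congr_left
  intro k hk
  rw [List.mem_range] at hk
  have hslice : PySem.List.slice padded (some (0 + 6 * (k : Int))) (some (0 + 6 * (k : Int) + 6))
      = (padded.drop (6 * k)).take 6 := by
    rw [show (0 + 6 * (k : Int)) = ((6 * k : Nat) : Int) by push_cast; ring,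
      show ((6 * k : Nat) : Int) + 6 = ((6 * k + 6 : Nat) : Int) by push_cast; ring,
      PySem.List.slice_natCast]
    simp
  simp only [Function.comp]
  rw [hslice, hwin k hk, Option.getD_some]
  obtain ⟨hw0, hw1⟩ := pvBfoldBound ((S.drop (6 * k)).take 6) 0 le_rfl
  have hle : ((S.drop (6 * k)).take 6).length ≤ 6 := List.length_take_le _ _
  have hpow : (2:Int) ^ ((S.drop (6 * k)).take 6).length ≤ 2 ^ 6 :=
    pow_le_pow_right₀ (by norm_num) hle
  exact pvTblEmit _ hw0 (by nlinarith)

-- the two pad expressions agree and are the natural-number pad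
theorem pvPadEq (n : Nat) : PySem.Int.mod (6 - PySem.Int.mod (n : Int) 6) 6
    = (((6 - n % 6) % 6 : Nat) : Int) := by
  rw [pvMod6, pvMod6]
  omega

theorem sixbit_main (s : String) (hpre : Pre_sixbit_encode s) :
    sixbit_encode s = sixbit_encode_alt s := by
  unfold Pre_sixbit_encode at hpre
  simp only [Bool.and_eq_true, Bool.or_eq_true, decide_eq_true_eq] at hpre
  obtain ⟨⟨⟨hcne, hsufws⟩, ha5⟩, hsufcase⟩ := hpre
  set l : List Char := s.toList with hl
  set wsP : List Char := l.takeWhile pvIsWs with hwsP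
  set rest : List Char := l.dropWhile pvIsWs with hrestd
  set core : List Char := rest.takeWhile pvBitB with hcored
  set suf : List Char := rest.dropWhile pvBitB with hsufd
  have hlsplit : l = wsP ++ rest := (List.takeWhile_append_dropWhile).symm
  have hrsplit : rest = core ++ suf := (List.takeWhile_append_dropWhile).symm
  have hwsall : wsP.all pvIsWs = true := pvAllTakeWhile _ _
  have hcoreall : core.all pvBitB = true := pvAllTakeWhile _ _
  set a : Nat := wsP.length with haw
  set m : Nat := core.length with hmw
  set n : Nat := l.length with hn
  set p : Nat := (6 - n % 6) % 6 with hp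
  have hm1 : 1 ≤ m := by
    rcases Nat.eq_zero_or_pos m with h | h
    · exact absurd (List.eq_nil_of_length_eq_zero (hmw ▸ h)) hcne
    · exact h
  have hlne : l ≠ [] := by
    intro h
    apply hcne
    rw [hcored, hrestd, h]
    rfl
  have hpad : PySem.Int.mod (6 - PySem.Int.mod ((n : Nat) : Int) 6) 6 = ((p : Nat) : Int) :=
    pvPadEq n
  have hptn : (((p : Nat) : Int)).toNat = p := by simp
  simp only [sixbit_encode, sixbit_encode_alt]
  rw [hpad, hptn, if_neg hlne]
  rcases hsufcase with hsuf0 | hn6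
  · -- no trailing whitespace: l = wsP ++ core
    have hlc : l = wsP ++ core := by rw [hlsplit, hrsplit, hsuf0, List.append_nil]
    have hnam : n = a + m := by rw [hn, hlc, List.length_append, haw, hmw]
    have hdvd : (n + p) % 6 = 0 := by omega
    set G : Nat := (n + p) / 6 with hGd
    have h6G : 6 * G = n + p := by omega
    have hG1 : 1 ≤ G := by omega
    set rest2 : List Char := core ++ List.replicate p '0' with hrest2
    have hr2len : rest2.length = m + p := by simp [hrest2, ← hmw]
    have hr2b : rest2.all pvBitB = true := by
      rw [hrest2, List.all_append, hcoreall, Bool.true_and, List.all_eq_true]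
      intro c hc
      rw [List.eq_of_mem_replicate hc]
      decide
    set padded : List Char := l ++ List.replicate p '0' with hpadded
    have hpsplit : padded = wsP ++ rest2 := by
      rw [hpadded, hlc, hrest2, List.append_assoc]
    have hplen : padded.length = 6 * G := by
      rw [hpsplit, List.length_append, ← haw, hr2len]; omega
    set S : List Char := List.replicate a '0' ++ rest2 with hS
    have hSlen : S.length = 6 * G := by
      rw [hS, List.length_append, List.length_replicate, hr2len]; omega
    have hwin : ∀ k : Nat, k < G →
        pvParse2 ((padded.drop (6 * k)).take 6)
          = some (pvBfold 0 ((S.drop (6 * k)).take 6)) := by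
      intro k hk
      by_cases hk0 : k = 0
      · subst hk0
        simp only [Nat.mul_zero, List.drop_zero]
        set d : List Char := rest2.take (6 - a) with hd
        have hdb : d.all pvBitB = true := by
          rw [List.all_eq_true] at hr2b ⊢
          exact fun c hc => hr2b c (List.mem_of_mem_take hc)
        have hdne : d ≠ [] := by
          have : d.length = min (6 - a) rest2.length := by rw [hd, List.length_take]
          intro h
          rw [h] at this
          simp only [List.length_nil] at this
          omega
      -- padded.take 6 = wsP ++ d
        have htp : padded.take 6 = wsP ++ d := by
          rw [hpsplit, List.take_append, List.take_of_length_le (by omega : wsP.length ≤ 6), ← haw]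
        have htS : S.take 6 = List.replicate a '0' ++ d := by
          rw [hS, List.take_append, List.take_of_length_le (by simp; omega), List.length_replicate]
        rw [htp, htS, pvBfold_zeros_prefix]
        have := pvParse2_wdt wsP d [] hwsall hdb (by simp) hdne
        simpa using this
      · have hka : a ≤ 6 * k := by omega
        have hdp : padded.drop (6 * k) = rest2.drop (6 * k - a) := by
          rw [hpsplit, List.drop_append, List.drop_eq_nil_of_le (by omega : wsP.length ≤ 6 * k),
            List.nil_append, ← haw]
        have hdS : S.drop (6 * k) = rest2.drop (6 * k - a) := by
          rw [hS, List.drop_append, List.drop_eq_nil_of_le (by simp; omega),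
            List.nil_append, List.length_replicate]
        rw [hdp, hdS]
        set d : List Char := (rest2.drop (6 * k - a)).take 6 with hd
        have hdb : d.all pvBitB = true := by
          rw [List.all_eq_true] at hr2b ⊢
          exact fun c hc => hr2b c (List.mem_of_mem_drop (List.mem_of_mem_take hc))
        have hdne : d ≠ [] := by
          have : d.length = min 6 (rest2.length - (6 * k - a)) := by
            rw [hd, List.length_take, List.length_drop]
          intro h
          rw [h] at this
          simp only [List.length_nil] at this
          omega
        exact pvParse2_bits d hdb hdne
    rw [pvAmap padded S G hplen hwin]
    -- B's side
    have hparse : pvParse2 l = some (pvBfold 0 core) := by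
      have := pvParse2_wdt wsP core [] hwsall hcoreall (by simp) hcne
      rw [List.append_nil] at this
      rw [hlc]
      exact this
    have hVS : pvBfold 0 S = pvBfold 0 core * 2 ^ p := by
      rw [hS, pvBfold_zeros_prefix, hrest2, pvBfold_append_zeros]
    have hg : PySem.Int.floordiv (((n : Nat) : Int) + ((p : Nat) : Int)) 6 = ((G : Nat) : Int) := by
      rw [pvFdiv _ _ (by norm_num)]
      omega
    rw [hparse, Option.getD_some, hg, PySem.List.pyRange_one, List.map_map]
    have hGt : (((G : Nat) : Int) - 0).toNat = G := by simp
    rw [hGt]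
    refine congrArg₂ Prod.mk (congrArg String.ofList ?_) rfl
    apply List.map_congr_left
    intro k hk
    rw [List.mem_range] at hk
    simp only [Function.comp_apply]
    have hexp : (6 * (((G : Nat) : Int) - 1 - (0 + (k : Nat)))).toNat = 6 * (G - 1 - k) := by
      omega
    rw [hexp, pvFdiv _ _ (by positivity), pvMod64]
    rw [show pvBfold 0 core * 2 ^ p = pvBfold 0 S from hVS.symm]
    exact congrArg pvEmit (pvChunkVal S G k hSlen hk).symm
  · -- single sextet with trailing whitespace: l.length = 6, pad = 0
    have hp0 : p = 0 := by omega
    have hm6 : m ≤ 6 := by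
      have e1 := congrArg List.length hlsplit
      have e2 := congrArg List.length hrsplit
      simp only [List.length_append] at e1 e2
      omega
    have hpadded0 : l ++ List.replicate p '0' = l := by rw [hp0]; simp
    rw [hpadded0]
    have hparse : pvParse2 l = some (pvBfold 0 core) := by
      rw [hlsplit, hrsplit]
      exact pvParse2_wdt wsP core suf hwsall hcoreall hsufws hcne
    obtain ⟨hw0, hw1⟩ := pvBfoldBound core 0 le_rfl
    have hpow : (2:Int) ^ core.length ≤ 2 ^ 6 := pow_le_pow_right₀ (by norm_num) hm6
    have hwlt : pvBfold 0 core < 64 := by nlinarith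
    -- A's side: one window, the whole string
    have hA : (PySem.List.pyRange 0 ((l.length : Nat) : Int) 6).foldl
        (fun pay i =>
          pay ++ [PySem.List.pyGetD ((PySem.List.pyRange 0 64 1).map
            (fun i => if i < 40 then Char.ofNat (i + 48).toNat else Char.ofNat (i + 56).toNat))
            ((pvParse2 (PySem.List.slice l (some i) (some (i + 6)))).getD 0) ' ']) []
        = [pvEmit (pvBfold 0 core)] := by
      have hr6 : PySem.List.pyRange 0 ((l.length : Nat) : Int) 6 = [(0 : Int)] := by
        have hln6 : l.length = 6 := hn6
        rw [hln6, PySem.List.pyRange_of_pos 0 _ (by norm_num : (0:Int) < 6)]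
        norm_num
      rw [hr6]
      simp only [List.foldl_cons, List.foldl_nil, List.nil_append]
      have hslice : PySem.List.slice l (some (0:Int)) (some ((0:Int) + 6)) = l := by
        rw [show (0:Int) = ((0:Nat):Int) from rfl,
          show ((0:Nat):Int) + 6 = ((6:Nat):Int) by norm_num, PySem.List.slice_natCast]
        simp only [List.drop_zero]
        exact List.take_of_length_le (by omega)
      rw [hslice, hparse, Option.getD_some, pvTblEmit _ hw0 hwlt]
    rw [hA]
    -- B's side: g = 1, one arithmetic group
    have hg : PySem.Int.floordiv (((n : Nat) : Int) + ((p : Nat) : Int)) 6 = 1 := by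
      rw [pvFdiv _ _ (by norm_num)]
      omega
    have hrange : PySem.List.pyRange 0 (1:Int) 1 = [(0:Int)] := by
      simpa using PySem.List.pyRange_one_singleton 0
    rw [hparse, Option.getD_some, hg, hrange, List.map_singleton]
    refine congrArg₂ Prod.mk (congrArg String.ofList ?_) rfl
    have hexp : (6 * ((1:Int) - 1 - 0)).toNat = 0 := by norm_num
    rw [hexp, hp0]
    rw [pvFdiv _ _ (by norm_num), pvMod64]
    simp only [pow_zero, mul_one, Int.ediv_one]
    rw [Int.emod_eq_of_lt hw0 hwlt]

-- ===== VERDICT (by name: the statement is the Claim_ definition above) =====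
theorem sixbit_encode_spec : Claim_equal_sixbit_encode := by
  intro s _ hpre
  unfold Spec_sixbit_encode
  exact sixbit_main s hpre
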